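-- pv_equiv track=rewrite | github.com/mjennings061/vgs-chatbot | vgs_chatbot/services/document_processor.py | _extract_header_path
-- ===== SOURCE A (Python) =====
-- def _extract_header_path(lines: list[str], current_line_idx: int) -> str:
--     """Extract header path context for a given line position.
--
--     Args:
--         lines: All lines from the document
--         current_line_idx: Current line index to extract context for
--
--     Returns:
--         Header path string (e.g. "DHO 2305 > Annex E > Weather Limitations")
--     """
--     headers = []
--     # Look backwards from current position to find recent headings
--     for i in range(max(0, current_line_idx - 50), current_line_idx):
--         line = lines[i].strip()
--         if line:
--             # Check for enhanced structure headings
--             if line.startswith("===") and line.endswith("==="):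
--                 header = line.replace("===", "").strip()
--                 if header:
--                     headers.append(header)
--             # Check for markdown-style headings
--             elif line.startswith("#"):
--                 header = line.lstrip("#").strip()
--                 if header:
--                     headers.append(header)
--             # Check for document reference patterns (DHO, Annex, etc.)
--             elif any(
--                 pattern in line.upper()
--                 for pattern in ["DHO ", "ANNEX ", "APPENDIX ", "SECTION "]
--             ):
--                 if len(line) < 100:  # Avoid long paragraphs
--                     headers.append(line)
--
--     # Return the last 3 headers to avoid overly long paths
--     return " > ".join(headers[-3:]) if headers else ""
-- ===== SOURCE B (Python) =====
-- def _header_of(line: str):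
--     """Classify one stripped, nonblank-checked line; return its header text or None."""
--     if not line:
--         return None
--     if line.startswith("===") and line.endswith("==="):
--         header = line.replace("===", "").strip()
--         return header if header else None
--     if line.startswith("#"):
--         header = line.lstrip("#").strip()
--         return header if header else None
--     if any(p in line.upper() for p in ["DHO ", "ANNEX ", "APPENDIX ", "SECTION "]):
--         if len(line) < 100:
--             return line
--     return None
--
--
-- def _extract_header_path(lines: list[str], current_line_idx: int) -> str:
--     # Scan backward from the current line; stop as soon as 3 headers are found.
--     headers = []
--     for i in range(current_line_idx - 1, max(0, current_line_idx - 50) - 1, -1):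
--         h = _header_of(lines[i].strip())
--         if h is not None:
--             headers.append(h)
--             if len(headers) == 3:
--                 break
--     headers.reverse()
--     return " > ".join(headers)
-- ===== Notes on version B (the rewrite author's own statement) =====
-- stated objective: alternative
-- what changed: Replaces the forward scan that collects every header in the 50-line window and then slices the last 3 with a backward scan through a shared per-line classifier that stops as soon as 3 headers are found, then reverses.
import Mathlib
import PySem

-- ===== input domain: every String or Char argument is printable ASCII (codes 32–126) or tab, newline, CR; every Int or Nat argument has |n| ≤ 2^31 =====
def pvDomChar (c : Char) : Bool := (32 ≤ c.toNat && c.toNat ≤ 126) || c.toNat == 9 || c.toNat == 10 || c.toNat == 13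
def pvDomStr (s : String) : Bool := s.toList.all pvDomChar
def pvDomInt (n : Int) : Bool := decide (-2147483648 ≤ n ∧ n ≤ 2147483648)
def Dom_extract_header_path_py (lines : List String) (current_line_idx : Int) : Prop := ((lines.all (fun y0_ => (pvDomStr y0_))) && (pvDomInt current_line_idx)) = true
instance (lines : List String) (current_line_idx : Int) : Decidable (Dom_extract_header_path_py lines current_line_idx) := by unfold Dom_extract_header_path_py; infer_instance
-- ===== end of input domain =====

-- B replaces A's forward scan (collect all headers in the window, keep the last 3)
-- by a backward scan that stops as soon as 3 headers are found; same return value.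

-- hand port of Python's s.lstrip("#") (PySem has no left-only strip with a chars
-- argument): drop leading '#' characters — exact for the single-char strip set "#".
def lstripHash (s : String) : String := String.ofList (s.toList.dropWhile (· == '#'))

-- ===== PORT A =====
def extract_header_path_py (lines : List String) (current_line_idx : Int) : String :=
  let headers := (PySem.List.pyRange (max 0 (current_line_idx - 50)) current_line_idx 1).foldl
    (fun headers i =>
      let line := PySem.Str.strip (PySem.List.pyGetD lines i "")
      if line ≠ "" then
        if PySem.Str.startswith line "===" && PySem.Str.endswith line "===" then
          let header := PySem.Str.strip (PySem.Str.replace line "===" "")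
          if header ≠ "" then headers ++ [header] else headers
        else if PySem.Str.startswith line "#" then
          let header := PySem.Str.strip (lstripHash line)
          if header ≠ "" then headers ++ [header] else headers
        else if ["DHO ", "ANNEX ", "APPENDIX ", "SECTION "].any
            (fun p => PySem.Str.isIn p (PySem.Str.upper line)) then
          if PySem.Str.len line < 100 then headers ++ [line] else headers
        else headers
      else headers) []
  if headers ≠ [] then PySem.Str.join " > " (PySem.List.slice headers (some (-3)) none) else ""

-- ===== PORT B =====
-- port of Source B's _header_of
def headerOf (line : String) : Option String :=
  if line = "" then none
  else if PySem.Str.startswith line "===" && PySem.Str.endswith line "===" then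
    let header := PySem.Str.strip (PySem.Str.replace line "===" "")
    if header ≠ "" then some header else none
  else if PySem.Str.startswith line "#" then
    let header := PySem.Str.strip (lstripHash line)
    if header ≠ "" then some header else none
  else if ["DHO ", "ANNEX ", "APPENDIX ", "SECTION "].any
      (fun p => PySem.Str.isIn p (PySem.Str.upper line)) then
    if PySem.Str.len line < 100 then some line else none
  else none

-- Source B's backward loop with its `break` once 3 headers are collected
def bLoop (lines : List String) : List Int → List String → List String
  | [], headers => headers
  | i :: rest, headers =>
    match headerOf (PySem.Str.strip (PySem.List.pyGetD lines i "")) with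
    | some h =>
      if (headers ++ [h]).length = 3 then headers ++ [h]
      else bLoop lines rest (headers ++ [h])
    | none => bLoop lines rest headers

def extract_header_path_py_alt (lines : List String) (current_line_idx : Int) : String :=
  let headers := bLoop lines
    (PySem.List.pyRange (current_line_idx - 1) (max 0 (current_line_idx - 50) - 1) (-1)) []
  PySem.Str.join " > " headers.reverse

-- ===== PRECONDITION & SPEC =====
-- Python A raises IndexError iff current_line_idx exceeds len(lines) (the window then
-- reads past the end); exactly those inputs are excluded.
def Pre_extract_header_path_py (lines : List String) (current_line_idx : Int) : Prop :=
  current_line_idx ≤ lines.length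
instance (lines : List String) (current_line_idx : Int) : Decidable (Pre_extract_header_path_py lines current_line_idx) := by unfold Pre_extract_header_path_py; infer_instance

def pvWitness_extract_header_path_py : List String × Int :=
  (["# Intro", "DHO 2305 rules", "text"], 3)

def Spec_extract_header_path_py (lines : List String) (current_line_idx : Int) (out : String) : Prop := out = extract_header_path_py_alt lines current_line_idx
instance (lines : List String) (current_line_idx : Int) (out : String) : Decidable (Spec_extract_header_path_py lines current_line_idx out) := by unfold Spec_extract_header_path_py; infer_instance

-- ===== CLAIM (what is proved, stated in full; the proofs are below) =====
def Claim_equal_extract_header_path_py : Prop := ∀ (lines : List String) (current_line_idx : Int), Dom_extract_header_path_py lines current_line_idx → Pre_extract_header_path_py lines current_line_idx → Spec_extract_header_path_py lines current_line_idx (extract_header_path_py lines current_line_idx)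

-- ===== LEMMAS AND PROOFS =====

-- A's loop body is exactly headerOf-then-append
theorem astep_eq (lines : List String) (acc : List String) (i : Int) :
    (let line := PySem.Str.strip (PySem.List.pyGetD lines i "")
      if line ≠ "" then
        if PySem.Str.startswith line "===" && PySem.Str.endswith line "===" then
          let header := PySem.Str.strip (PySem.Str.replace line "===" "")
          if header ≠ "" then acc ++ [header] else acc
        else if PySem.Str.startswith line "#" then
          let header := PySem.Str.strip (lstripHash line)
          if header ≠ "" then acc ++ [header] else acc
        else if ["DHO ", "ANNEX ", "APPENDIX ", "SECTION "].any
            (fun p => PySem.Str.isIn p (PySem.Str.upper line)) then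
          if PySem.Str.len line < 100 then acc ++ [line] else acc
        else acc
      else acc)
    = acc ++ (headerOf (PySem.Str.strip (PySem.List.pyGetD lines i ""))).toList := by
  simp only [headerOf]
  split_ifs <;> simp_all

-- A's fold collects exactly the classified headers, in order
theorem afold_eq (lines : List String) (xs : List Int) (acc : List String) :
    xs.foldl
      (fun headers i =>
        let line := PySem.Str.strip (PySem.List.pyGetD lines i "")
        if line ≠ "" then
          if PySem.Str.startswith line "===" && PySem.Str.endswith line "===" then
            let header := PySem.Str.strip (PySem.Str.replace line "===" "")
            if header ≠ "" then headers ++ [header] else headers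
          else if PySem.Str.startswith line "#" then
            let header := PySem.Str.strip (lstripHash line)
            if header ≠ "" then headers ++ [header] else headers
          else if ["DHO ", "ANNEX ", "APPENDIX ", "SECTION "].any
              (fun p => PySem.Str.isIn p (PySem.Str.upper line)) then
            if PySem.Str.len line < 100 then headers ++ [line] else headers
          else headers
        else headers) acc
    = acc ++ xs.filterMap (fun i => headerOf (PySem.Str.strip (PySem.List.pyGetD lines i ""))) := by
  induction xs generalizing acc with
  | nil => simp
  | cons i rest ih =>
    cases h : headerOf (PySem.Str.strip (PySem.List.pyGetD lines i "")) with
    | none =>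
      rw [List.foldl_cons, astep_eq lines acc i, h, List.filterMap_cons]
      simp only [h, Option.toList_none, List.append_nil]
      exact ih acc
    | some v =>
      rw [List.foldl_cons, astep_eq lines acc i, h, List.filterMap_cons]
      simp only [h, Option.toList_some]
      rw [ih (acc ++ [v])]
      simp

-- B's loop takes the first (3 - |acc|) classified headers of the remaining indices
theorem bLoop_eq (lines : List String) (ys : List Int) (acc : List String)
    (hacc : acc.length < 3) :
    bLoop lines ys acc
    = acc ++ (ys.filterMap (fun i => headerOf (PySem.Str.strip (PySem.List.pyGetD lines i "")))).take (3 - acc.length) := by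
  induction ys generalizing acc with
  | nil => simp [bLoop]
  | cons i rest ih =>
    simp only [bLoop, List.filterMap_cons]
    cases h : headerOf (PySem.Str.strip (PySem.List.pyGetD lines i "")) with
    | none => simp [ih acc hacc]
    | some v =>
      simp only
      by_cases h3 : (acc ++ [v]).length = 3
      · simp only [if_pos h3]
        simp only [List.length_append, List.length_singleton] at h3
        have : 3 - acc.length = 1 := by omega
        simp [this]
      · simp only [if_neg h3]
        have h3' : acc.length + 1 ≠ 3 := by simpa using h3
        rw [ih (acc ++ [v]) (by simp; omega)]
        simp only [List.length_append, List.length_singleton]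
        have h4 : 3 - acc.length = (3 - (acc.length + 1)) + 1 := by omega
        rw [h4, List.take_succ_cons]
        simp

-- last-3-of-L equals reverse of take-3-of-reverse
theorem takeLast_eq (L : List String) :
    (L.reverse.take 3).reverse = L.drop (L.length - 3) := by
  rw [List.take_reverse]
  simp

theorem join_nil_str : PySem.Str.join " > " ([] : List String) = "" := by decide

-- ===== VERDICT (by name: the statement is the Claim_ definition above) =====
theorem extract_header_path_py_spec : Claim_equal_extract_header_path_py := by
  intro lines idx _ _
  unfold Spec_extract_header_path_py extract_header_path_py extract_header_path_py_alt
  rw [PySem.List.pyRange_neg_one_eq_reverse]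
  have hb : max 0 (idx - 50) - 1 + 1 = max 0 (idx - 50) := by omega
  have ha : idx - 1 + 1 = idx := by omega
  rw [hb, ha]
  set f := fun i => headerOf (PySem.Str.strip (PySem.List.pyGetD lines i "")) with hf
  rw [afold_eq, bLoop_eq lines _ [] (by simp)]
  rw [List.filterMap_reverse]
  set L := (PySem.List.pyRange (max 0 (idx - 50)) idx 1).filterMap f with hL
  simp only [List.nil_append, List.length_nil, Nat.sub_zero]
  rw [takeLast_eq]
  by_cases hE : L = []
  · rw [hE]
    simp only [ne_eq, not_true_eq_false, if_false, List.drop_nil]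
    exact (join_nil_str).symm
  · rw [if_pos hE]
    rw [PySem.List.slice_from_neg_ofNat L 3 (by omega)]
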